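-- pv_equiv track=rewrite | github.com/piecuch-group/ccpy | ccpy/models/operators.py | get_hole_combinations
-- ===== SOURCE A (Python) =====
-- def get_hole_combinations(n):
--     combs = []
--     for i in range(n + 1):
--         temp = ['O'] * n
--         for j in range(i):
--             temp[j] = 'o'
--         combs.append(temp)
--     return combs
-- ===== SOURCE B (Python) =====
-- def get_hole_combinations(n):
--     temp = ['O'] * n
--     combs = [temp[:]]
--     for i in range(n):
--         temp[i] = 'o'
--         combs.append(temp[:])
--     return combs
-- ===== Notes on version B (the rewrite author's own statement) =====
-- stated objective: alternative
-- what changed: B keeps one working row, flips a single position per iteration and snapshots it, instead of A's per-row rebuild with a nested loop rewriting i positions.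
-- outside the precondition, e.g. on get_hole_combinations(-1): A returns [], B returns [[]]
import Mathlib
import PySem

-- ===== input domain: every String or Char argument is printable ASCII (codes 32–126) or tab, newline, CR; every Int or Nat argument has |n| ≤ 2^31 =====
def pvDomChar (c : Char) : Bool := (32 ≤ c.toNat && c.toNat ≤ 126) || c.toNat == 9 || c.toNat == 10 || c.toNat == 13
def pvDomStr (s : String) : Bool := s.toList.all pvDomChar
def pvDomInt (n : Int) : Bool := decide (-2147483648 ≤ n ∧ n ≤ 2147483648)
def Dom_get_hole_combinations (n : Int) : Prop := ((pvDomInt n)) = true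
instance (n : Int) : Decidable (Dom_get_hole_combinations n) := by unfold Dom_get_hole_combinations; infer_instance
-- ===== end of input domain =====

-- B keeps one working row, flipping one position per step and snapshotting it, instead of
-- A's per-row rebuild with a nested loop; same cost class, different decomposition.

-- ===== PORT A =====
-- ['O'] * n is [] for n < 0, hence List.replicate n.toNat; temp[j] = 'o' always hits an index
-- in range (j < i ≤ n = len temp), so List.set is exact here.
def get_hole_combinations (n : Int) : List (List String) :=
  (PySem.List.pyRange 0 (n + 1) 1).foldl
    (fun combs i =>
      let temp := List.replicate n.toNat "O"
      let temp := (PySem.List.pyRange 0 i 1).foldl (fun t j => t.set j.toNat "o") temp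
      combs ++ [temp]) []

-- ===== PORT B =====
-- state = (combs, temp); temp[i] = 'o' always in range (i < n = len temp), so List.set is exact.
def get_hole_combinations_alt (n : Int) : List (List String) :=
  let temp0 : List String := List.replicate n.toNat "O"
  ((PySem.List.pyRange 0 n 1).foldl
    (fun (st : List (List String) × List String) i =>
      let t := st.2.set i.toNat "o"
      (st.1 ++ [t], t)) ([temp0], temp0)).1

-- ===== PRECONDITION & SPEC =====
-- Pre_ excludes negative n, a meaningless hole count outside the function's natural domain:
-- there A's empty range yields [] while B naturally emits its single all-'O' (empty) row.
def Pre_get_hole_combinations (n : Int) : Prop := 0 ≤ n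
instance (n : Int) : Decidable (Pre_get_hole_combinations n) := by unfold Pre_get_hole_combinations; infer_instance
def pvWitness_get_hole_combinations : Int := (3)

def Spec_get_hole_combinations (n : Int) (out : List (List String)) : Prop := out = get_hole_combinations_alt n
instance (n : Int) (out : List (List String)) : Decidable (Spec_get_hole_combinations n out) := by unfold Spec_get_hole_combinations; infer_instance

-- ===== CLAIM (what is proved, stated in full; the proofs are below) =====
def Claim_equal_get_hole_combinations : Prop := ∀ (n : Int), Dom_get_hole_combinations n → Pre_get_hole_combinations n → Spec_get_hole_combinations n (get_hole_combinations n)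

-- ===== LEMMAS AND PROOFS =====

-- the i-th row: i 'o's then (m-i) 'O's
def pvRow (m i : Nat) : List String := List.replicate i "o" ++ List.replicate (m - i) "O"

theorem pvRow_zero (m : Nat) : pvRow m 0 = List.replicate m "O" := by
  simp [pvRow]

theorem pvRow_set (m i : Nat) (h : i < m) : (pvRow m i).set i "o" = pvRow m (i + 1) := by
  have hm : m - i = (m - (i + 1)) + 1 := by omega
  simp only [pvRow, hm, List.replicate_succ]
  rw [List.set_append_right _ _ (by simp)]
  simp
  rw [← List.cons_append, ← List.replicate_succ, List.replicate_succ' (n := i), List.append_assoc]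
  simp

-- A's inner loop builds pvRow m i directly
theorem pv_innerA (m i : Nat) (h : i ≤ m) :
    (PySem.List.pyRange 0 (i : Int) 1).foldl (fun t j => t.set j.toNat "o")
      (List.replicate m "O") = pvRow m i := by
  induction i with
  | zero => simp [PySem.List.pyRange_one_eq_nil, pvRow_zero]
  | succ k ih =>
    have hk : (0 : Int) ≤ (k : Int) := by positivity
    have : ((k + 1 : Nat) : Int) = (k : Int) + 1 := by push_cast; ring
    rw [this, PySem.List.pyRange_one_succ_right hk, List.foldl_append,
      ih (by omega)]
    simp [pvRow_set m k (by omega)]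

-- A's outer loop, up to bound k
theorem pv_outerA (m k : Nat) (h : k ≤ m + 1) :
    (PySem.List.pyRange 0 (k : Int) 1).foldl
      (fun combs i =>
        combs ++ [(PySem.List.pyRange 0 i 1).foldl (fun t j => t.set j.toNat "o")
          (List.replicate m "O")]) [] = (List.range k).map (pvRow m) := by
  induction k with
  | zero => simp [PySem.List.pyRange_one_eq_nil]
  | succ k ih =>
    have hk : (0 : Int) ≤ (k : Int) := by positivity
    have : ((k + 1 : Nat) : Int) = (k : Int) + 1 := by push_cast; ring
    rw [this, PySem.List.pyRange_one_succ_right hk, List.foldl_append, ih (by omega)]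
    simp [pv_innerA m k (by omega), List.range_succ]

-- B's loop invariant: after k steps, combs = rows 0..k and temp = row k
theorem pv_loopB (m k : Nat) (h : k ≤ m) :
    (PySem.List.pyRange 0 (k : Int) 1).foldl
      (fun (st : List (List String) × List String) i =>
        (st.1 ++ [st.2.set i.toNat "o"], st.2.set i.toNat "o"))
      ([List.replicate m "O"], List.replicate m "O")
    = ((List.range (k + 1)).map (pvRow m), pvRow m k) := by
  induction k with
  | zero => simp [PySem.List.pyRange_one_eq_nil, pvRow_zero]
  | succ k ih =>
    have hk : (0 : Int) ≤ (k : Int) := by positivity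
    have : ((k + 1 : Nat) : Int) = (k : Int) + 1 := by push_cast; ring
    rw [this, PySem.List.pyRange_one_succ_right hk, List.foldl_append, ih (by omega)]
    simp [pvRow_set m k (by omega), List.range_succ]

-- ===== VERDICT (by name: the statement is the Claim_ definition above) =====
theorem get_hole_combinations_spec : Claim_equal_get_hole_combinations := by
  intro n _ hpre
  obtain ⟨m, rfl⟩ := Int.eq_ofNat_of_zero_le hpre
  unfold Spec_get_hole_combinations get_hole_combinations get_hole_combinations_alt
  have hm1 : ((m : Int) + 1) = ((m + 1 : Nat) : Int) := by push_cast; ring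
  have htoNat : (m : Int).toNat = m := by simp
  rw [hm1, htoNat, pv_outerA m (m + 1) (by omega)]
  have := pv_loopB m m (le_refl m)
  simp only [] at this ⊢
  rw [this]
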